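-- pv_equiv track=rewrite | github.com/ahblay/strip_packing | main.py | find_ones
-- ===== SOURCE A (Python) =====
-- def find_ones(rect, w, h, coord):
--     result = []
--     if coord[0] + rect[0] <= w and coord[1] + rect[1] <= h:
--         ones = []
--         for row in range(coord[1], coord[1] + rect[1]):
--             ones += list(range(row * w + coord[0], row * w + coord[0] + rect[0]))
--         for i in range(w * h):
--             if i in ones:
--                 result.append(1)
--             else:
--                 result.append(0)
--     return result
-- ===== SOURCE B (Python) =====
-- def find_ones(rect, w, h, coord):
--     if coord[0] + rect[0] > w:
--         return []
--     if coord[1] + rect[1] > h: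
--         return []
--     n = w * h
--     hits = sorted({row * w + c
--                    for row in range(coord[1], coord[1] + rect[1])
--                    for c in range(coord[0], coord[0] + rect[0])
--                    if 0 <= row * w + c < n})
--     out = []
--     prev = 0
--     for idx in hits:
--         out += [0] * (idx - prev)
--         out.append(1)
--         prev = idx + 1
--     out += [0] * (n - prev)
--     return out
-- ===== Notes on version B (the rewrite author's own statement) =====
-- stated objective: alternative
-- what changed: Instead of testing 'i in ones' with a linear scan for every cell of the w*h grid, B collects the in-range marked indices into a set, sorts it, and emits the output in one sweep as runs of zeros between consecutive marked indices.
import Mathlib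
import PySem

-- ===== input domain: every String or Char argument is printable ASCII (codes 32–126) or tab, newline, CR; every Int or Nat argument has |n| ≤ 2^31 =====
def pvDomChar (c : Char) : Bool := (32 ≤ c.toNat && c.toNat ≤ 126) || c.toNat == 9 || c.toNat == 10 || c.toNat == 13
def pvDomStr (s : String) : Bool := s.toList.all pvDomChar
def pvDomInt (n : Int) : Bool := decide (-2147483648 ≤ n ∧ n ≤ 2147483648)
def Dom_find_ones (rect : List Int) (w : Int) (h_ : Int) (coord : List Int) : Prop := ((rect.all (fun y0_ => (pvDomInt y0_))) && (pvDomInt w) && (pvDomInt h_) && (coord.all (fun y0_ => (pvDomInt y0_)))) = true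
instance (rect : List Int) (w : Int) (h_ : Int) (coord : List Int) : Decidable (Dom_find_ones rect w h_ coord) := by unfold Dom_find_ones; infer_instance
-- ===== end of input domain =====

-- B sorts the (deduplicated, in-range) marked indices once and emits the output as runs of
-- zeros between consecutive hits, instead of A's membership scan per grid cell (objective: alternative).


-- ===== PORT A =====
def find_ones (rect : List Int) (w : Int) (h_ : Int) (coord : List Int) : List Int :=
  let result : List Int := []
  let c0 := ((PySem.List.pyGet? coord 0).getD 0)
  let r0 := ((PySem.List.pyGet? rect 0).getD 0)
  let c1 := ((PySem.List.pyGet? coord 1).getD 0)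
  let r1 := ((PySem.List.pyGet? rect 1).getD 0)
  if c0 + r0 ≤ w ∧ c1 + r1 ≤ h_ then
    let ones := (PySem.List.pyRange c1 (c1 + r1) 1).foldl
      (fun acc row => acc ++ PySem.List.pyRange (row * w + c0) (row * w + c0 + r0) 1) []
    (PySem.List.pyRange 0 (w * h_) 1).foldl
      (fun res i => res ++ [if i ∈ ones then (1 : Int) else 0]) result
  else result

-- ===== PORT B =====
def find_ones_alt (rect : List Int) (w : Int) (h_ : Int) (coord : List Int) : List Int :=
  if w < ((PySem.List.pyGet? coord 0).getD 0) + ((PySem.List.pyGet? rect 0).getD 0) then []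
  else if h_ < ((PySem.List.pyGet? coord 1).getD 0) + ((PySem.List.pyGet? rect 1).getD 0) then []
  else
    let c0 := ((PySem.List.pyGet? coord 0).getD 0)
    let r0 := ((PySem.List.pyGet? rect 0).getD 0)
    let c1 := ((PySem.List.pyGet? coord 1).getD 0)
    let r1 := ((PySem.List.pyGet? rect 1).getD 0)
    let n := w * h_
    -- sorted({row*w+c for row in … for c in … if 0 <= row*w+c < n})
    let hits : List Int := PySem.List.sorted
      (PySem.Set.ofList ((PySem.List.pyRange c1 (c1 + r1) 1).flatMap (fun row =>
        ((PySem.List.pyRange c0 (c0 + r0) 1).map (fun c => row * w + c)).filter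
          (fun x => decide (0 ≤ x ∧ x < n)))))
      (fun x => x) false
    let st := hits.foldl
      (fun (st : List Int × Int) idx =>
        (st.1 ++ List.replicate (idx - st.2).toNat 0 ++ [1], idx + 1)) ([], 0)
    st.1 ++ List.replicate (n - st.2).toNat 0

-- ===== PRECONDITION & SPEC =====
-- Pre_ excludes exactly the inputs on which Python A raises IndexError: rect/coord empty,
-- or (when the first guard passes, so the second operand of 'and' is evaluated) of length 1.
def Pre_find_ones (rect : List Int) (w : Int) (h_ : Int) (coord : List Int) : Prop :=
  rect ≠ [] ∧ coord ≠ [] ∧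
    (coord.headI + rect.headI ≤ w → (2 ≤ rect.length ∧ 2 ≤ coord.length))
instance (rect : List Int) (w : Int) (h_ : Int) (coord : List Int) : Decidable (Pre_find_ones rect w h_ coord) := by unfold Pre_find_ones; infer_instance
def pvWitness_find_ones : List Int × Int × Int × List Int := ([2, 1], 3, 2, [0, 0])
def Spec_find_ones (rect : List Int) (w : Int) (h_ : Int) (coord : List Int) (out : List Int) : Prop := out = find_ones_alt rect w h_ coord
instance (rect : List Int) (w : Int) (h_ : Int) (coord : List Int) (out : List Int) : Decidable (Spec_find_ones rect w h_ coord out) := by unfold Spec_find_ones; infer_instance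

-- ===== CLAIM (what is proved, stated in full; the proofs are below) =====
def Claim_equal_find_ones : Prop := ∀ (rect : List Int) (w : Int) (h_ : Int) (coord : List Int), Dom_find_ones rect w h_ coord → Pre_find_ones rect w h_ coord → Spec_find_ones rect w h_ coord (find_ones rect w h_ coord)

-- ===== LEMMAS AND PROOFS =====

-- the run-of-zeros construction over a strictly increasing, bounded hit list IS the indicator map
theorem run_build (n : Int) (hits : List Int) :
    ∀ (acc : List Int) (prev : Int), hits.Pairwise (· < ·) →
    (∀ x ∈ hits, prev ≤ x ∧ x < n) →
    (let st := hits.foldl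
        (fun (st : List Int × Int) idx =>
          (st.1 ++ List.replicate (idx - st.2).toNat 0 ++ [1], idx + 1)) (acc, prev);
      st.1 ++ List.replicate (n - st.2).toNat 0)
    = acc ++ (PySem.List.pyRange prev n 1).map (fun i => if i ∈ hits then (1 : Int) else 0) := by
  induction hits with
  | nil =>
    intro acc prev _ _
    simp [PySem.List.length_pyRange_one, List.map_const']
  | cons a t ih =>
    intro acc prev hp hb
    have hpa : prev ≤ a := (hb a (by simp)).1
    have han : a < n := (hb a (by simp)).2
    have hat : ∀ x ∈ t, a < x := (List.pairwise_cons.mp hp).1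
    simp only [List.foldl_cons]
    rw [ih (acc ++ List.replicate (a - prev).toNat 0 ++ [1]) (a + 1)
      (List.pairwise_cons.mp hp).2
      (fun x hx => ⟨by have := hat x hx; omega, (hb x (by simp [hx])).2⟩)]
    rw [PySem.List.pyRange_one_append prev a n hpa (by omega)]
    rw [PySem.List.pyRange_one_append a (a + 1) n (by omega) (by omega)]
    rw [PySem.List.pyRange_one_singleton]
    simp only [List.map_append, List.map_cons, List.map_nil]
    have h1 : (PySem.List.pyRange prev a 1).map (fun i => if i ∈ a :: t then (1 : Int) else 0)
        = List.replicate (a - prev).toNat 0 := by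
      rw [List.map_congr_left (g := fun _ => (0 : Int)) ?_]
      · simp [PySem.List.length_pyRange_one, List.map_const']
      · intro i hi
        rw [PySem.List.mem_pyRange_one] at hi
        have hia : i ≠ a := by omega
        have hit : i ∉ t := fun hmem => by have := hat i hmem; omega
        simp [hia, hit]
    have h2 : (if a ∈ a :: t then (1 : Int) else 0) = 1 := by simp
    have h3 : (PySem.List.pyRange (a + 1) n 1).map (fun i => if i ∈ a :: t then (1 : Int) else 0)
        = (PySem.List.pyRange (a + 1) n 1).map (fun i => if i ∈ t then (1 : Int) else 0) := by
      apply List.map_congr_left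
      intro i hi
      rw [PySem.List.mem_pyRange_one] at hi
      have hia : i ≠ a := by omega
      simp [hia]
    rw [h1, h2, h3]
    simp [List.append_assoc]

-- membership in B's cell list (before the range filter) = membership in A's 'ones'
theorem mem_cells_iff (w c0 r0 c1 r1 i : Int) :
    (i ∈ (PySem.List.pyRange c1 (c1 + r1) 1).flatMap (fun row =>
        (PySem.List.pyRange c0 (c0 + r0) 1).map (fun c => row * w + c)))
    ↔ (i ∈ (PySem.List.pyRange c1 (c1 + r1) 1).flatMap (fun row =>
        PySem.List.pyRange (row * w + c0) (row * w + c0 + r0) 1)) := by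
  simp only [List.mem_flatMap, List.mem_map, PySem.List.mem_pyRange_one]
  constructor
  · rintro ⟨row, hrow, c, hc, rfl⟩
    exact ⟨row, hrow, by omega⟩
  · rintro ⟨row, hrow, hi⟩
    exact ⟨row, hrow, i - row * w, by omega, by omega⟩

-- ===== VERDICT (by name: the statement is the Claim_ definition above) =====
theorem find_ones_spec : Claim_equal_find_ones := by
  intro rect w h_ coord _ hpre
  unfold Spec_find_ones
  obtain ⟨hr, hc, hlen⟩ := hpre
  obtain ⟨r0, rtl, rfl⟩ := List.exists_cons_of_ne_nil hr
  obtain ⟨c0, ctl, rfl⟩ := List.exists_cons_of_ne_nil hc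
  have f0 : PySem.List.pyGet? (r0 :: rtl) 0 = some r0 := PySem.List.pyGet?_zero_cons _ _
  have e0 : PySem.List.pyGet? (c0 :: ctl) 0 = some c0 := PySem.List.pyGet?_zero_cons _ _
  by_cases h1 : c0 + r0 ≤ w
  · obtain ⟨hrl, hcl⟩ := hlen (by simpa using h1)
    obtain ⟨r1, rtl2, rfl⟩ : ∃ y l, rtl = y :: l := by
      cases rtl with
      | nil => simp at hrl
      | cons y l => exact ⟨y, l, rfl⟩
    obtain ⟨c1, ctl2, rfl⟩ : ∃ y l, ctl = y :: l := by
      cases ctl with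
      | nil => simp at hcl
      | cons y l => exact ⟨y, l, rfl⟩
    have f1 : PySem.List.pyGet? (r0 :: r1 :: rtl2) 1 = some r1 := by
      have := PySem.List.pyGet?_natCast (xs := r0 :: r1 :: rtl2) (n := 1)
      simpa using this
    have e1 : PySem.List.pyGet? (c0 :: c1 :: ctl2) 1 = some c1 := by
      have := PySem.List.pyGet?_natCast (xs := c0 :: c1 :: ctl2) (n := 1)
      simpa using this
    simp only [find_ones, find_ones_alt, f0, e0, f1, e1, Option.getD_some]
    by_cases h2 : c1 + r1 ≤ h_
    · rw [if_pos ⟨h1, h2⟩, if_neg (by omega), if_neg (by omega)]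
      set n := w * h_ with hn
      set cells := (PySem.List.pyRange c1 (c1 + r1) 1).flatMap (fun row =>
        ((PySem.List.pyRange c0 (c0 + r0) 1).map (fun c => row * w + c)).filter
          (fun x => decide (0 ≤ x ∧ x < n))) with hcells
      set hits := PySem.List.sorted (PySem.Set.ofList cells) (fun x => x) false with hhits
      have hsorted : hits.Pairwise (· < ·) := by
        rw [hhits]; exact PySem.List.sorted_ofList_pairwise_lt cells
      have hmemhits : ∀ i, i ∈ hits ↔ i ∈ cells := by
        intro i
        rw [hhits, PySem.List.mem_sorted, ← PySem.List.dedup_eq_ofList, PySem.List.mem_dedup]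
      have hbound : ∀ x ∈ hits, (0 : Int) ≤ x ∧ x < n := by
        intro x hx
        rw [hmemhits, hcells] at hx
        obtain ⟨row, _, hf⟩ := List.mem_flatMap.mp hx
        have := List.mem_filter.mp hf
        simpa using this.2
      rw [run_build n hits [] 0 hsorted hbound]
      rw [PySem.List.foldl_append_singleton_eq_map]
      simp only [List.nil_append]
      rw [PySem.List.foldl_append_eq_flatMap, List.nil_append]
      apply List.map_congr_left
      intro i hi
      rw [PySem.List.mem_pyRange_one] at hi
      have : i ∈ hits ↔ i ∈ (PySem.List.pyRange c1 (c1 + r1) 1).flatMap (fun row =>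
          PySem.List.pyRange (row * w + c0) (row * w + c0 + r0) 1) := by
        rw [hmemhits, hcells, ← mem_cells_iff w c0 r0 c1 r1 i]
        simp only [List.mem_flatMap, List.mem_filter, List.mem_map]
        constructor
        · rintro ⟨row, hrow, hin, _⟩
          exact ⟨row, hrow, hin⟩
        · rintro ⟨row, hrow, hin⟩
          exact ⟨row, hrow, hin, by simp; omega⟩
      simp only [this]
    · rw [if_neg (fun hcontra => h2 hcontra.2), if_neg (by omega), if_pos (by omega)]
  · simp only [find_ones, find_ones_alt, f0, e0, Option.getD_some]
    rw [if_neg (fun hcontra => h1 hcontra.1), if_pos (by omega)]
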